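-- pv_equiv track=rewrite | github.com/geethsenaviratne/parallel-quicksort-suite | Charts/compare_graphs.py | _get_colors_for_impl
-- ===== SOURCE A (Python) =====
-- COLORS = {
--     'Serial': '#B0B0B0',               # gray baseline
--     'OpenMP (8 threads)': '#1f77b4',   # blue
--     'MPI (8 processes)': '#2ca02c',    # green
--     'CUDA (256 blocks)': '#d62728',    # red
-- }
--
-- def _get_colors_for_impl(impl_list, enforce_serial_gray=True):
--     colors = []
--     for name in impl_list:
--         if name in COLORS:
--             c = COLORS[name]
--         else:
--             lname = name.lower()
--             if 'serial' in lname: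
--                 c = COLORS.get('Serial', '#B0B0B0')
--             elif 'openmp' in lname:
--                 c = COLORS.get('OpenMP (8 threads)', '#1f77b4')
--             elif 'mpi' in lname:
--                 c = COLORS.get('MPI (8 processes)', '#2ca02c')
--             elif 'cuda' in lname:
--                 c = COLORS.get('CUDA', '#d62728')
--             else:
--                 c = '#7f7f7f'
--         colors.append(c)
--     # Ensure serial bar is gray if it's the first and enforce_serial_gray True
--     if enforce_serial_gray and len(impl_list) > 0 and 'serial' in impl_list[0].lower():
--         colors[0] = COLORS.get('Serial', colors[0])
--     return colors
-- ===== SOURCE B (Python) =====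
-- _KEYWORD_COLORS = [
--     ('serial', '#B0B0B0'),
--     ('openmp', '#1f77b4'),
--     ('mpi', '#2ca02c'),
--     ('cuda', '#d62728'),
-- ]
--
-- def _get_colors_for_impl(impl_list, enforce_serial_gray=True):
--     return [next((c for k, c in _KEYWORD_COLORS if k in name.lower()), '#7f7f7f')
--             for name in impl_list]
-- ===== Notes on version B (the rewrite author's own statement) =====
-- stated objective: idiomatic
-- what changed: Replaced the exact-match dict lookup plus if/elif substring cascade and the no-op serial post-fix by a single ordered (keyword, color) table scanned once per name (first substring match wins, default gray).
import Mathlib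
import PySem

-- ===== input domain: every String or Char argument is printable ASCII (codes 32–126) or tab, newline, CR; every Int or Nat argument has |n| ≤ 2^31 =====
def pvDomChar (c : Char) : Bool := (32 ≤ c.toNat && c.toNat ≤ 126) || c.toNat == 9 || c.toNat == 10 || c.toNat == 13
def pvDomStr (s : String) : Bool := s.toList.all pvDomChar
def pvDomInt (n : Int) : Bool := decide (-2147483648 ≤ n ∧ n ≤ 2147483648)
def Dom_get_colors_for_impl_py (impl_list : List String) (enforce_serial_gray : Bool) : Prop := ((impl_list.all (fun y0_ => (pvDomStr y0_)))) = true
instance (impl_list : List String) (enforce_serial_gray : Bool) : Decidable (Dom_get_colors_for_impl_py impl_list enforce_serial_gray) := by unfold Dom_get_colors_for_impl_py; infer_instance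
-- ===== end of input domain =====

-- B replaces A's exact-match dict plus if/elif substring cascade (and its no-op serial post-fix)
-- by a single table-driven first-keyword scan; objective: simpler/more idiomatic, same cost.

-- ===== PORT A =====
def pvColors : PySem.Dict String String :=
  PySem.Dict.ofList [("Serial", "#B0B0B0"), ("OpenMP (8 threads)", "#1f77b4"),
                     ("MPI (8 processes)", "#2ca02c"), ("CUDA (256 blocks)", "#d62728")]

-- body of A's loop: the exact-match lookup, else the if/elif substring cascade
def pvColorA (name : String) : String :=
  match pvColors.get? name with
  | some c => c
  | none =>
    let lname := PySem.Str.lower name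
    if PySem.Str.isIn "serial" lname then pvColors.getD "Serial" "#B0B0B0"
    else if PySem.Str.isIn "openmp" lname then pvColors.getD "OpenMP (8 threads)" "#1f77b4"
    else if PySem.Str.isIn "mpi" lname then pvColors.getD "MPI (8 processes)" "#2ca02c"
    else if PySem.Str.isIn "cuda" lname then pvColors.getD "CUDA" "#d62728"
    else "#7f7f7f"

def get_colors_for_impl_py (impl_list : List String) (enforce_serial_gray : Bool) : List String :=
  let colors := impl_list.foldl (fun acc name => acc ++ [pvColorA name]) []
  if enforce_serial_gray && decide (0 < impl_list.length)
       && PySem.Str.isIn "serial" (PySem.Str.lower (PySem.List.pyGetD impl_list 0 "")) then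
    PySem.List.pySetD colors 0 (pvColors.getD "Serial" (PySem.List.pyGetD colors 0 ""))
  else colors

-- ===== PORT B =====
def pvKeywordColors : List (String × String) :=
  [("serial", "#B0B0B0"), ("openmp", "#1f77b4"), ("mpi", "#2ca02c"), ("cuda", "#d62728")]

def pvPickColor (name : String) : String :=
  match pvKeywordColors.find? (fun kc => PySem.Str.isIn kc.1 (PySem.Str.lower name)) with
  | some kc => kc.2
  | none => "#7f7f7f"

def get_colors_for_impl_py_alt (impl_list : List String) (enforce_serial_gray : Bool) : List String :=
  impl_list.map pvPickColor

-- ===== PRECONDITION & SPEC =====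
def Spec_get_colors_for_impl_py (impl_list : List String) (enforce_serial_gray : Bool) (out : List String) : Prop := out = get_colors_for_impl_py_alt impl_list enforce_serial_gray
instance (impl_list : List String) (enforce_serial_gray : Bool) (out : List String) : Decidable (Spec_get_colors_for_impl_py impl_list enforce_serial_gray out) := by unfold Spec_get_colors_for_impl_py; infer_instance

-- ===== CLAIM (what is proved, stated in full; the proofs are below) =====
def Claim_equal_get_colors_for_impl_py : Prop := ∀ (impl_list : List String) (enforce_serial_gray : Bool), Dom_get_colors_for_impl_py impl_list enforce_serial_gray → Spec_get_colors_for_impl_py impl_list enforce_serial_gray (get_colors_for_impl_py impl_list enforce_serial_gray)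

-- ===== LEMMAS AND PROOFS =====

-- the per-element colours agree
theorem pvColorA_eq_pick (name : String) : pvColorA name = pvPickColor name := by
  by_cases h1 : name = "Serial"
  · subst h1; decide
  by_cases h2 : name = "OpenMP (8 threads)"
  · subst h2; decide
  by_cases h3 : name = "MPI (8 processes)"
  · subst h3; decide
  by_cases h4 : name = "CUDA (256 blocks)"
  · subst h4; decide
  have hget : pvColors.get? name = none := by
    rw [PySem.Dict.get?_eq_none_iff_not_mem_keys]
    have hk : pvColors.keys = ["Serial", "OpenMP (8 threads)", "MPI (8 processes)", "CUDA (256 blocks)"] := by decide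
    rw [hk]; simp [h1, h2, h3, h4]
  simp only [pvColorA, pvPickColor, pvKeywordColors, hget, List.find?]
  split_ifs with s1 s2 s3 s4 <;> simp_all <;> rfl

-- any name containing "serial" (lower-cased) is already gray
theorem pick_gray_of_serial (name : String)
    (h : PySem.Str.isIn "serial" (PySem.Str.lower name) = true) :
    pvPickColor name = "#B0B0B0" := by
  have h' : PySem.Chars.isIn ['s', 'e', 'r', 'i', 'a', 'l'] (PySem.Chars.lower name.toList) = true := by
    simpa using h
  simp [pvPickColor, pvKeywordColors, h']

-- ===== VERDICT (by name: the statement is the Claim_ definition above) =====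
theorem get_colors_for_impl_py_spec : Claim_equal_get_colors_for_impl_py := by
  intro impl_list enforce _
  show get_colors_for_impl_py impl_list enforce = get_colors_for_impl_py_alt impl_list enforce
  have hmap : impl_list.foldl (fun acc name => acc ++ [pvColorA name]) [] = impl_list.map pvPickColor := by
    rw [PySem.List.foldl_append_singleton_eq_map]
    exact List.map_congr_left (fun x _ => pvColorA_eq_pick x)
  unfold get_colors_for_impl_py get_colors_for_impl_py_alt
  rw [hmap]
  split_ifs with h
  · -- post-fix: colors[0] is already gray
    obtain ⟨⟨-, hlen⟩, hser⟩ := by simpa [Bool.and_eq_true] using h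
    cases impl_list with
    | nil => simp at hlen
    | cons x xs =>
      have hx : PySem.Str.isIn "serial" (PySem.Str.lower x) = true := by
        simpa [PySem.List.pyGetD_zero_cons] using hser
      have hgray : pvColors.getD "Serial" "#B0B0B0" = "#B0B0B0" := by decide
      simp [pick_gray_of_serial x hx, hgray, PySem.List.pySetD_of_nonneg]
  · rfl
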